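-- pv_equiv track=rewrite | github.com/pedrojunqueira/pybites | 287/sum_indices.py | sum_indices
-- ===== SOURCE A (Python) =====
-- from typing import List
-- from collections import defaultdict
--
-- def accumulator(arr):
--     s = 0
--     for i, _ in enumerate(arr):
--         s += sum(arr[: i + 1])
--     return s
--
-- def sum_indices(items: List[str]) -> int:
--     item_indexes = defaultdict(list)
--     for i, item in enumerate(items):
--         item_indexes[item].append(i)
--     sums = []
--     for idx in item_indexes.values():
--         sums.append(accumulator(idx))
--     return sum(sums)
-- ===== SOURCE B (Python) =====
-- def sum_indices(items):
--     # One pass: for each item keep the running sum of its indices seen so far;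
--     # each new occurrence contributes that running prefix sum to the total.
--     running = {}
--     total = 0
--     for i, item in enumerate(items):
--         p = running.get(item, 0) + i
--         running[item] = p
--         total += p
--     return total
-- ===== Notes on version B (the rewrite author's own statement) =====
-- stated objective: faster
-- what changed: Replaces the group-then-quadratic-prefix-sum (dict of index lists plus accumulator that re-sums every prefix slice) by a single pass keeping one running prefix sum per item and adding it to the total.
import Mathlib
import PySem

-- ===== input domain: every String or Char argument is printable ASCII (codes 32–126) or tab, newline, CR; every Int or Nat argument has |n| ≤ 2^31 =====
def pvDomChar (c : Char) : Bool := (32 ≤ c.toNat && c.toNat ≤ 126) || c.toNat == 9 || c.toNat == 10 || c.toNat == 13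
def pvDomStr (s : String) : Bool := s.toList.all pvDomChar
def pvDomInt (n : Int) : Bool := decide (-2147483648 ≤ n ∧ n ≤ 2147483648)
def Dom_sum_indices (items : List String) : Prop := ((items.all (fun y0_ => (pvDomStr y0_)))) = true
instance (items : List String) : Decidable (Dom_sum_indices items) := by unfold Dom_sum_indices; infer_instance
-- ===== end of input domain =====

-- B replaces A's group-into-index-lists plus per-group prefix-slice re-summation by a
-- single pass keeping one running prefix sum of indices per item (objective: faster).

-- ===== PORT A =====
def accumulator (arr : List Int) : Int :=
  (PySem.List.enumerate arr 0).foldl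
    (fun s p => s + (PySem.List.slice arr none (some (p.1 + 1))).sum) 0

def sum_indices (items : List String) : Int :=
  let item_indexes : PySem.Dict String (List Int) :=
    (PySem.List.enumerate items 0).foldl
      (fun d p => d.modify p.2 [] (fun v => v ++ [p.1])) PySem.Dict.empty
  let sums := item_indexes.values.map accumulator
  sums.sum

-- ===== PORT B =====
def sum_indices_alt (items : List String) : Int :=
  ((PySem.List.enumerate items 0).foldl
    (fun s p =>
      let v := s.1.getD p.2 0 + p.1
      (s.1.insert p.2 v, s.2 + v))
    ((PySem.Dict.empty : PySem.Dict String Int), (0 : Int))).2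

-- ===== PRECONDITION & SPEC =====
def Spec_sum_indices (items : List String) (out : Int) : Prop := out = sum_indices_alt items
instance (items : List String) (out : Int) : Decidable (Spec_sum_indices items out) := by unfold Spec_sum_indices; infer_instance

-- ===== CLAIM (what is proved, stated in full; the proofs are below) =====
def Claim_equal_sum_indices : Prop := ∀ (items : List String), Dom_sum_indices items → Spec_sum_indices items (sum_indices items)

-- ===== LEMMAS AND PROOFS =====

/-- The index list of key `x` in `items` (what A's defaultdict stores at `x`). -/
def grp (x : String) (items : List String) : List Int :=
  ((PySem.List.enumerate items 0).filter (fun p => p.2 == x)).map (·.1)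

/-- A's result in closed form: sum of `accumulator` over the groups, keyed by first occurrence. -/
def Fclosed (items : List String) : Int :=
  ((PySem.Set.ofList items).map (fun k => accumulator (grp k items))).sum

lemma dictA_swap (l : List (Int × String)) (d : PySem.Dict String (List Int)) :
    l.foldl (fun d p => d.modify p.2 [] (fun v => v ++ [p.1])) d
      = (l.map Prod.swap).foldl (fun d q => d.modify q.1 [] (fun v => v ++ [q.2])) d := by
  simp [List.foldl_map]

lemma A_eq_F (items : List String) : sum_indices items = Fclosed items := by
  rw [sum_indices, Fclosed]
  set L := (PySem.List.enumerate items 0).map Prod.swap with hL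
  set d := (L.foldl (fun d q => d.modify q.1 [] (fun v => v ++ [q.2])) (PySem.Dict.empty : PySem.Dict String (List Int))) with hd
  have hsw : (PySem.List.enumerate items 0).foldl
      (fun d p => d.modify p.2 [] (fun v => v ++ [p.1])) (PySem.Dict.empty : PySem.Dict String (List Int)) = d :=
    dictA_swap _ _
  simp only [hsw]
  have hnd : d.keys.Nodup := by
    rw [hd]
    exact PySem.Dict.nodup_keys_foldl_modify_key L Prod.fst [] (fun _ q => (fun v => v ++ [q.2])) _ (by simp [PySem.Dict.keys_empty])
  have hkeys : d.keys = PySem.Set.ofList items := by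
    rw [hd, PySem.Dict.keys_foldl_modify_key L Prod.fst [] (fun _ q => (fun v => v ++ [q.2]))]
    rw [hL, List.map_map]
    have : (Prod.fst ∘ Prod.swap : Int × String → String) = Prod.snd := rfl
    rw [this]
    simp [PySem.Dict.keys_empty, PySem.Set.update_nil_left, PySem.List.map_snd_enumerate]
  have hgetD : ∀ k, d.getD k [] = grp k items := by
    intro k
    rw [hd, PySem.Dict.getD_foldl_modify_append L PySem.Dict.empty k, hL]
    rw [List.filter_map, List.map_map]
    simp only [PySem.Dict.getD_empty, List.nil_append, grp]
    congr 1
  rw [PySem.Dict.values_eq_map_keys d hnd [], hkeys, List.map_map]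
  congr 1
  apply List.map_congr_left
  intro k hk
  simp [Function.comp_apply, hgetD k]

lemma acc_eq (arr : List Int) :
    accumulator arr = ((List.range arr.length).map (fun i => (arr.take (i+1)).sum)).sum := by
  rw [accumulator, PySem.List.foldl_add]
  have h1 : (PySem.List.enumerate arr 0).map (fun p => (PySem.List.slice arr none (some (p.1 + 1))).sum)
      = ((PySem.List.enumerate arr 0).map (·.1)).map (fun i => (PySem.List.slice arr none (some (i + 1))).sum) := by
    simp [List.map_map, Function.comp_def]
  rw [h1, PySem.List.map_fst_enumerate, PySem.List.pyRange_one, List.map_map]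
  simp only [zero_add, Int.toNat_natCast, sub_zero]
  congr 1
  apply List.map_congr_left
  intro i hi
  simp only [Function.comp_apply]
  rw [PySem.List.slice_to arr (b := (i:Int)+1) (by positivity)]
  norm_num

lemma acc_snoc (l : List Int) (a : Int) :
    accumulator (l ++ [a]) = accumulator l + l.sum + a := by
  rw [acc_eq, acc_eq]
  simp only [List.length_append, List.length_singleton, List.range_succ, List.map_append,
    List.sum_append, List.map_cons, List.map_nil, List.sum_cons, List.sum_nil]
  have h1 : (List.range l.length).map (fun i => ((l ++ [a]).take (i+1)).sum)
      = (List.range l.length).map (fun i => (l.take (i+1)).sum) := by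
    apply List.map_congr_left
    intro i hi
    rw [List.take_append_of_le_length (by simpa using List.mem_range.mp hi)]
  have h2 : (l ++ [a]).take (l.length + 1) = l ++ [a] := List.take_of_length_le (by simp)
  rw [h1, h2]
  simp
  ring

lemma acc_singleton (a : Int) : accumulator [a] = a := by
  rw [acc_eq]; simp

lemma grp_snoc (k x : String) (items : List String) :
    grp k (items ++ [x])
      = grp k items ++ (if x == k then [(items.length : Int)] else []) := by
  simp [grp, PySem.List.enumerate_append, PySem.List.enumerate_cons, List.filter_append]
  by_cases h : x = k <;> simp [h]

lemma grp_nil_of_not_mem (x : String) (items : List String) (hx : x ∉ items) :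
    grp x items = [] := by
  have : ∀ p ∈ PySem.List.enumerate items (0:Int), ¬ (p.2 == x) = true := by
    intro p hp
    simp only [beq_iff_eq]
    intro h
    apply hx
    rw [← h, ← PySem.List.map_snd_enumerate items 0]
    exact List.mem_map_of_mem hp
  simp [grp, List.filter_eq_nil_iff.mpr this]

lemma sum_map_single_change (l : List String) (hn : l.Nodup) (x : String) (hx : x ∈ l)
    (f g : String → Int) (h : ∀ y ∈ l, y ≠ x → f y = g y) :
    (l.map f).sum = (l.map g).sum + (f x - g x) := by
  induction l with
  | nil => simp at hx
  | cons a l ih =>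
      rcases List.mem_cons.mp hx with rfl | hx'
      · have hnot : x ∉ l := (List.nodup_cons.mp hn).1
        have : l.map f = l.map g := List.map_congr_left (fun y hy => h y (List.mem_cons_of_mem _ hy) (fun e => hnot (e ▸ hy)))
        simp [this]; ring
      · have ha : a ≠ x := fun e => (List.nodup_cons.mp hn).1 (e ▸ hx')
        rw [List.map_cons, List.map_cons, List.sum_cons, List.sum_cons,
          ih (List.nodup_cons.mp hn).2 hx' (fun y hy hyx => h y (List.mem_cons_of_mem _ hy) hyx),
          h a (List.mem_cons_self) ha]
        ring

lemma F_snoc (items : List String) (x : String) :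
    Fclosed (items ++ [x]) = Fclosed items + (grp x items).sum + items.length := by
  rw [Fclosed, Fclosed, PySem.Set.ofList_append_singleton]
  by_cases hx : x ∈ items
  · rw [PySem.Set.add_of_mem (by simp [PySem.Set.mem_ofList, hx])]
    rw [sum_map_single_change (PySem.Set.ofList items) (PySem.Set.nodup_ofList items) x
      (by simp [PySem.Set.mem_ofList, hx])
      (fun k => accumulator (grp k (items ++ [x]))) (fun k => accumulator (grp k items))
      (fun y _ hyx => by simp only [grp_snoc, beq_iff_eq]; simp [Ne.symm hyx])]
    rw [grp_snoc x x items, if_pos (by simp), acc_snoc]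
    ring
  · rw [PySem.Set.add_of_not_mem (by simp [PySem.Set.mem_ofList, hx])]
    rw [List.map_append, List.sum_append]
    have h1 : (PySem.Set.ofList items).map (fun k => accumulator (grp k (items ++ [x])))
        = (PySem.Set.ofList items).map (fun k => accumulator (grp k items)) := by
      apply List.map_congr_left
      intro y hy
      have hyx : x ≠ y := fun e => hx (e ▸ ((PySem.Set.mem_ofList items y).mp hy))
      simp only [grp_snoc, beq_iff_eq]; simp [hyx]
    rw [h1]
    simp only [List.map_cons, List.map_nil, List.sum_cons, List.sum_nil]
    rw [grp_snoc, grp_nil_of_not_mem x items hx]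
    simp [acc_singleton]

lemma B_dict_getD (l : List (Int × String)) (k : String) :
    ∀ (d : PySem.Dict String Int) (t : Int),
    ((l.foldl (fun s p =>
        let v := s.1.getD p.2 0 + p.1
        (s.1.insert p.2 v, s.2 + v)) (d, t)).1).getD k 0
      = d.getD k 0 + ((l.filter (fun p => p.2 == k)).map (·.1)).sum := by
  induction l with
  | nil => simp
  | cons p l ih =>
      intro d t
      simp only [List.foldl_cons, List.filter_cons]
      rw [ih]
      by_cases h : p.2 = k
      · simp [h]
        ring
      · simp [h, PySem.Dict.getD_insert, Ne.symm h]

lemma B_snoc (items : List String) (x : String) :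
    sum_indices_alt (items ++ [x])
      = sum_indices_alt items + (grp x items).sum + items.length := by
  simp only [sum_indices_alt, PySem.List.enumerate_append, PySem.List.enumerate_cons,
    PySem.List.enumerate_nil, List.foldl_append, List.foldl_cons, List.foldl_nil]
  rw [B_dict_getD]
  simp [grp]
  ring

lemma A_eq_B (items : List String) : sum_indices items = sum_indices_alt items := by
  induction items using List.reverseRecOn with
  | nil => decide
  | append_singleton items x ih =>
      rw [A_eq_F, F_snoc, B_snoc, ← A_eq_F, ih]

-- ===== VERDICT (by name: the statement is the Claim_ definition above) =====
theorem sum_indices_spec : Claim_equal_sum_indices := by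
  intro items _
  exact A_eq_B items
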